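-- pv_equiv track=rewrite | github.com/oktaviacitra/neural-network-perceptron | main.py | operan_true
-- ===== SOURCE A (Python) =====
-- def find_index(inputs):
--     index = []
--     for i in range(len(inputs)):
--         if inputs[i] == 1:
--             index.append(i)
--     return index
--
-- def operan_true(inputs, w1, w2):
--     index = find_index(inputs)
--     result = []
--     j = 0
--     for i in range(len(w2)):
--         if j >= len(index):
--             result.append(w1[i])
--         else:
--             if i == index[j]:
--                 result.append(w2[i])
--                 j += 1
--             else:
--                 result.append(w1[i])
--     return result
-- ===== SOURCE B (Python) =====
-- def operan_true(inputs, w1, w2):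
--     return [w2[i] if i < len(inputs) and inputs[i] == 1 else w1[i]
--             for i in range(len(w2))]
-- ===== Notes on version B (the rewrite author's own statement) =====
-- stated objective: simpler
-- what changed: A single comprehension picks w2[i] or w1[i] directly per position, eliminating A's find_index table and the pointer j walk.
import Mathlib
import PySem

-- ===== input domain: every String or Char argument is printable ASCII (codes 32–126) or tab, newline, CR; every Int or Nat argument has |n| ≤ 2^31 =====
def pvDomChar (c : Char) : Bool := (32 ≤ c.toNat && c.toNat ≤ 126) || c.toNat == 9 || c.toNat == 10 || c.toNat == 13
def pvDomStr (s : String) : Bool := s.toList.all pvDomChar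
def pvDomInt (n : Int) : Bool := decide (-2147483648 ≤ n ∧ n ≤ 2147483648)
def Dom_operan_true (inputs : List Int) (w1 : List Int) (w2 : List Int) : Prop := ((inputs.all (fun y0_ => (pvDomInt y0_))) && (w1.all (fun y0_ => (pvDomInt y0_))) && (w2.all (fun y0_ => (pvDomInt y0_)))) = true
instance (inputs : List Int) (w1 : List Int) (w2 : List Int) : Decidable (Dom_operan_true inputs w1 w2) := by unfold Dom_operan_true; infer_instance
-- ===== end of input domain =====

-- B replaces A's index-table-plus-pointer walk by a single per-position choice (objective: simpler).

-- ===== PORT A =====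
def find_index (inputs : List Int) : List Int :=
  (PySem.List.pyRange 0 (inputs.length : Int) 1).foldl
    (fun index i => if PySem.List.pyGetD inputs i 0 = 1 then index ++ [i] else index) []

def operan_true (inputs : List Int) (w1 : List Int) (w2 : List Int) : List Int :=
  let index := find_index inputs
  ((PySem.List.pyRange 0 (w2.length : Int) 1).foldl
    (fun (st : List Int × Int) i =>
      if st.2 ≥ (index.length : Int) then (st.1 ++ [PySem.List.pyGetD w1 i 0], st.2)
      else if i = PySem.List.pyGetD index st.2 0 then (st.1 ++ [PySem.List.pyGetD w2 i 0], st.2 + 1)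
      else (st.1 ++ [PySem.List.pyGetD w1 i 0], st.2)) ([], 0)).1

-- ===== PORT B =====
def operan_true_alt (inputs : List Int) (w1 : List Int) (w2 : List Int) : List Int :=
  (PySem.List.pyRange 0 (w2.length : Int) 1).map
    (fun i => if i < (inputs.length : Int) ∧ PySem.List.pyGetD inputs i 0 = 1
              then PySem.List.pyGetD w2 i 0 else PySem.List.pyGetD w1 i 0)

-- ===== PRECONDITION & SPEC =====
-- Pre_ excludes exactly the inputs where Python A raises IndexError (w1[i] with i ≥ len(w1)
-- at a position not selected from w2); B raises there too.
def Pre_operan_true (inputs : List Int) (w1 : List Int) (w2 : List Int) : Prop :=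
  ∀ i : Nat, i < w2.length → (i < inputs.length ∧ inputs.getD i 0 = 1) ∨ i < w1.length
instance (inputs : List Int) (w1 : List Int) (w2 : List Int) : Decidable (Pre_operan_true inputs w1 w2) := by unfold Pre_operan_true; infer_instance

def pvWitness_operan_true : List Int × List Int × List Int := ([1, 0, 1], [4, 5, 6], [7, 8, 9])

def Spec_operan_true (inputs : List Int) (w1 : List Int) (w2 : List Int) (out : List Int) : Prop := out = operan_true_alt inputs w1 w2
instance (inputs : List Int) (w1 : List Int) (w2 : List Int) (out : List Int) : Decidable (Spec_operan_true inputs w1 w2 out) := by unfold Spec_operan_true; infer_instance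

-- ===== CLAIM (what is proved, stated in full; the proofs are below) =====
def Claim_equal_operan_true : Prop := ∀ (inputs : List Int) (w1 : List Int) (w2 : List Int), Dom_operan_true inputs w1 w2 → Pre_operan_true inputs w1 w2 → Spec_operan_true inputs w1 w2 (operan_true inputs w1 w2)

-- ===== LEMMAS AND PROOFS =====

-- indices k ≥ a with inputs[k] = 1, as Ints (spec of A's suffix of the index table)
def selIdx (inputs : List Int) (a : Nat) : List Int :=
  if h : a < inputs.length then
    (if inputs[a] = 1 then [(a : Int)] else []) ++ selIdx inputs (a + 1)
  else []
termination_by inputs.length - a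

theorem selIdx_ge (inputs : List Int) (a : Nat) :
    ∀ x ∈ selIdx inputs a, (a : Int) ≤ x := by
  induction a using selIdx.induct inputs with
  | case1 a h ih =>
    intro x hx
    rw [selIdx, dif_pos h] at hx
    rcases List.mem_append.mp hx with h1 | h2
    · split at h1 <;> simp_all
    · have := ih x h2; omega
  | case2 a h => intro x hx; rw [selIdx, dif_neg h] at hx; simp at hx

theorem find_index_eq_aux (inputs : List Int) (a : Nat) (acc : List Int) :
    (PySem.List.pyRange (a : Int) (inputs.length : Int) 1).foldl
      (fun index i => if PySem.List.pyGetD inputs i 0 = 1 then index ++ [i] else index) acc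
    = acc ++ selIdx inputs a := by
  induction a using selIdx.induct inputs generalizing acc with
  | case1 a h ih =>
    rw [PySem.List.pyRange_one_cons (by exact_mod_cast h)]
    rw [selIdx, dif_pos h]
    simp only [List.foldl_cons]
    have hget : PySem.List.pyGetD inputs (a : Int) 0 = inputs[a] := by
      rw [PySem.List.pyGetD_natCast]; exact List.getD_eq_getElem _ _ h
    rw [show ((a : Int) + 1) = ((a + 1 : Nat) : Int) by push_cast; ring, ih]
    by_cases h1 : inputs[a] = 1 <;> simp [hget, h1]
  | case2 a h =>
    rw [PySem.List.pyRange_one_eq_nil (by exact_mod_cast Nat.le_of_not_lt h)]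
    rw [selIdx, dif_neg h]; simp

theorem find_index_eq (inputs : List Int) : find_index inputs = selIdx inputs 0 := by
  have := find_index_eq_aux inputs 0 []
  simpa [find_index] using this

theorem getD_drop_cons {l rest : List Int} {j : Nat} {x : Int}
    (h : l.drop j = x :: rest) : l.getD j 0 = x := by
  have h0 : (l.drop j)[0]? = some x := by rw [h]; rfl
  rw [List.getElem?_drop] at h0
  simp only [Nat.add_zero] at h0
  simp [List.getD, h0]

theorem main_loop (inputs w1 w2 : List Int) (a j : Nat) (res : List Int)
    (hinv : (find_index inputs).drop j = selIdx inputs a) :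
    ((PySem.List.pyRange (a : Int) (w2.length : Int) 1).foldl
      (fun (st : List Int × Int) i =>
        if st.2 ≥ ((find_index inputs).length : Int) then (st.1 ++ [PySem.List.pyGetD w1 i 0], st.2)
        else if i = PySem.List.pyGetD (find_index inputs) st.2 0 then (st.1 ++ [PySem.List.pyGetD w2 i 0], st.2 + 1)
        else (st.1 ++ [PySem.List.pyGetD w1 i 0], st.2)) (res, (j : Int))).1
    = res ++ (PySem.List.pyRange (a : Int) (w2.length : Int) 1).map
        (fun i => if i < (inputs.length : Int) ∧ PySem.List.pyGetD inputs i 0 = 1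
                  then PySem.List.pyGetD w2 i 0 else PySem.List.pyGetD w1 i 0) := by
  set I := find_index inputs with hI
  by_cases hab : a < w2.length
  · rw [PySem.List.pyRange_one_cons (by exact_mod_cast hab)]
    simp only [List.foldl_cons, List.map_cons]
    have hgetj : PySem.List.pyGetD I (j : Int) 0 = I.getD j 0 := by
      rw [PySem.List.pyGetD_natCast]
    have hgeti : PySem.List.pyGetD inputs (a : Int) 0 = inputs.getD a 0 := by
      rw [PySem.List.pyGetD_natCast]
    by_cases ha : a < inputs.length
    · have hsel : selIdx inputs a = (if inputs[a] = 1 then [(a : Int)] else []) ++ selIdx inputs (a + 1) := by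
        rw [selIdx, dif_pos ha]
      by_cases h1 : inputs[a] = 1
      · -- selected: head of remaining index is a
        have hdrop : I.drop j = (a : Int) :: selIdx inputs (a + 1) := by
          rw [hinv, hsel, if_pos h1]; rfl
        have hjlt : j < I.length := by
          by_contra hge
          have : I.drop j = [] := List.drop_eq_nil_of_le (Nat.le_of_not_lt hge)
          simp [this] at hdrop
        have hne : ¬ ((j : Int) ≥ (I.length : Int)) := by exact_mod_cast not_le.mpr hjlt
        rw [if_neg hne]
        have : PySem.List.pyGetD I (j : Int) 0 = (a : Int) := by
          rw [hgetj, getD_drop_cons hdrop]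
        rw [if_pos this.symm]
        have hBcond : (a : Int) < (inputs.length : Int) ∧ PySem.List.pyGetD inputs (a : Int) 0 = 1 := by
          refine ⟨by exact_mod_cast ha, ?_⟩
          rw [hgeti, List.getD_eq_getElem _ _ ha]; exact h1
        rw [if_pos hBcond]
        have hrec := main_loop inputs w1 w2 (a + 1) (j + 1)
          (res ++ [PySem.List.pyGetD w2 (a : Int) 0])
          (by rw [← List.drop_drop]; rw [hdrop]; rfl)
        push_cast at hrec ⊢
        rw [hrec]; simp
      · -- not selected
        have hdrop : I.drop j = selIdx inputs (a + 1) := by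
          rw [hinv, hsel, if_neg h1]; rfl
        have hBcond : ¬ ((a : Int) < (inputs.length : Int) ∧ PySem.List.pyGetD inputs (a : Int) 0 = 1) := by
          rintro ⟨-, hc⟩
          rw [hgeti, List.getD_eq_getElem _ _ ha] at hc; exact h1 hc
        rw [if_neg hBcond]
        have hstep : (if ((j : Int)) ≥ ((I.length : Int)) then (res ++ [PySem.List.pyGetD w1 (a : Int) 0], (j : Int))
            else if (a : Int) = PySem.List.pyGetD I (j : Int) 0 then (res ++ [PySem.List.pyGetD w2 (a : Int) 0], (j : Int) + 1)
            else (res ++ [PySem.List.pyGetD w1 (a : Int) 0], (j : Int)))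
            = (res ++ [PySem.List.pyGetD w1 (a : Int) 0], (j : Int)) := by
          by_cases hge : ((j : Int)) ≥ ((I.length : Int))
          · rw [if_pos hge]
          · rw [if_neg hge]
            have hjlt : j < I.length := by push_cast at hge; omega
            obtain ⟨x, rest, hx⟩ : ∃ x rest, I.drop j = x :: rest := by
              cases hdj : I.drop j with
              | nil => exfalso; have := List.drop_eq_nil_iff.mp hdj; omega
              | cons x rest => exact ⟨x, rest, rfl⟩
            have hxa : ((a : Int)) + 1 ≤ x := by
              have hx' : x ∈ selIdx inputs (a + 1) := by rw [← hdrop, hx]; exact List.mem_cons_self ..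
              have := selIdx_ge inputs (a + 1) x hx'; push_cast at this; omega
            have : PySem.List.pyGetD I (j : Int) 0 = x := by rw [hgetj, getD_drop_cons hx]
            rw [if_neg (by rw [this]; omega)]
        rw [hstep]
        have hrec := main_loop inputs w1 w2 (a + 1) j
          (res ++ [PySem.List.pyGetD w1 (a : Int) 0]) hdrop
        push_cast at hrec ⊢
        rw [hrec]; simp
    · -- a ≥ len inputs : index table exhausted
      have hdrop : I.drop j = [] := by rw [hinv, selIdx, dif_neg ha]
      have hjge : ((j : Int)) ≥ ((I.length : Int)) := by
        have := List.drop_eq_nil_iff.mp hdrop; exact_mod_cast this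
      rw [if_pos hjge]
      have hBcond : ¬ ((a : Int) < (inputs.length : Int) ∧ PySem.List.pyGetD inputs (a : Int) 0 = 1) := by
        rintro ⟨hc, -⟩; exact ha (by exact_mod_cast hc)
      rw [if_neg hBcond]
      have hrec := main_loop inputs w1 w2 (a + 1) j
        (res ++ [PySem.List.pyGetD w1 (a : Int) 0])
        (by rw [hdrop, selIdx, dif_neg (by omega : ¬ a + 1 < inputs.length)])
      push_cast at hrec ⊢
      rw [hrec]; simp
  · rw [PySem.List.pyRange_one_eq_nil (by exact_mod_cast Nat.le_of_not_lt hab)]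
    simp
termination_by w2.length - a

-- ===== VERDICT (by name: the statement is the Claim_ definition above) =====
theorem operan_true_spec : Claim_equal_operan_true := by
  intro inputs w1 w2 _ _
  show operan_true inputs w1 w2 = operan_true_alt inputs w1 w2
  unfold operan_true operan_true_alt
  have := main_loop inputs w1 w2 0 0 [] (by rw [List.drop_zero, find_index_eq])
  simpa using this
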